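-- pv_equiv track=rewrite | github.com/SINHOLEE/Algorithm | python/odk/a.py | funWithAnagrams
-- ===== SOURCE A (Python) =====
-- def funWithAnagrams(text):
--     deleted = [False] * len(text)
--
--     for i in range(len(text)-1):
--         for j in range(i+1, len(text)):
--             if deleted[i]:
--                 continue
--             if sorted(text[i]) != sorted(text[j]):
--                 continue
--             deleted[j] = True
--     new_text = []
--     for k in range(len(text)):
--         if deleted[k]:
--            continue
--         new_text.append(text[k])
--     new_text.sort()
--     # Write your code here
--     return new_text
-- ===== SOURCE B (Python) =====
-- def funWithAnagrams(text):
--     first = {}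
--     for s in text:
--         key = ''.join(sorted(s))
--         if key not in first:
--             first[key] = s
--     return sorted(first.values())
-- ===== Notes on version B (the rewrite author's own statement) =====
-- stated objective: faster
-- what changed: Replaces A's O(n^2) nested pairwise sorted-string comparisons and deleted-flag array with a single pass that keys a dict by each string's sorted-character signature, assigning only when the key is absent (keeping the first representative), then sorts the dict's values.
import Mathlib
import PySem

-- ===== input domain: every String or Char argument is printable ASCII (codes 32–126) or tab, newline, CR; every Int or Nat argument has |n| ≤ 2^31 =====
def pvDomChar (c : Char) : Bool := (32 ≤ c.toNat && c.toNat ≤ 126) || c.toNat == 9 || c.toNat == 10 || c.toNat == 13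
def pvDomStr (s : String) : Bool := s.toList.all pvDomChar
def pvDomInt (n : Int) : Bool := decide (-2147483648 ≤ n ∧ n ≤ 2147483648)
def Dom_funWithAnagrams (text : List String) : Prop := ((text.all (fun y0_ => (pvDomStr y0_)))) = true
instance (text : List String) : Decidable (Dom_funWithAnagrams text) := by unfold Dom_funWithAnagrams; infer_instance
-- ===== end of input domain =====

-- B replaces A's O(n^2) nested pairwise anagram comparison with one signature-keyed
-- dict pass (assign-if-absent) followed by a sort; return value only, neither mutates text.

-- shared helper: Python's sorted(s) on a string (a list of its characters, sorted)
def pvSortChars (s : String) : List Char := PySem.List.sorted s.toList (fun c => c) false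

-- ===== PORT A =====
def funWithAnagrams (text : List String) : List String :=
  let n : Int := text.length
  let deleted : List Bool := List.replicate text.length false
  let deleted :=
    (PySem.List.pyRange 0 (n - 1) 1).foldl (fun del i =>
      (PySem.List.pyRange (i + 1) n 1).foldl (fun del j =>
        if PySem.List.pyGetD del i false then del
        else if pvSortChars (PySem.List.pyGetD text i "") ≠ pvSortChars (PySem.List.pyGetD text j "") then del
        else del.set j.toNat true) del) deleted
  let new_text :=
    (PySem.List.pyRange 0 n 1).foldl (fun acc k =>
      if PySem.List.pyGetD deleted k false then acc
      else acc ++ [PySem.List.pyGetD text k ""]) []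
  PySem.List.sorted new_text (fun x => x) false

-- ===== PORT B =====
def funWithAnagrams_alt (text : List String) : List String :=
  let first := text.foldl (fun (d : PySem.Dict String String) s =>
    let key := String.ofList (pvSortChars s)
    if d.contains key then d else d.insert key s) PySem.Dict.empty
  PySem.List.sorted first.values (fun x => x) false

-- ===== PRECONDITION & SPEC =====
def Spec_funWithAnagrams (text : List String) (out : List String) : Prop := out = funWithAnagrams_alt text
instance (text : List String) (out : List String) : Decidable (Spec_funWithAnagrams text out) := by unfold Spec_funWithAnagrams; infer_instance

-- ===== CLAIM (what is proved, stated in full; the proofs are below) =====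
def Claim_equal_funWithAnagrams : Prop := ∀ (text : List String), Dom_funWithAnagrams text → Spec_funWithAnagrams text (funWithAnagrams text)

-- ===== LEMMAS AND PROOFS =====

-- the canonical "keep first representative of each anagram class" list
def pvCanon (seen : List (List Char)) : List String → List String
  | [] => []
  | s :: rest =>
      if pvSortChars s ∈ seen then pvCanon seen rest
      else s :: pvCanon (pvSortChars s :: seen) rest

-- signature of the k-th element
def pvSg (xs : List String) (k : Nat) : List Char := pvSortChars (xs.getD k "")

-- Nat-indexed form of A's inner-loop body
def pvStep (xs : List String) (i : Nat) (del : List Bool) (j : Nat) : List Bool :=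
  if del.getD i false then del
  else if pvSg xs i ≠ pvSg xs j then del
  else del.set j true

lemma getD_set_bool (l : List Bool) (j k : Nat) :
    ((l.set j true).getD k false) = if j = k ∧ j < l.length then true else l.getD k false := by
  simp [List.getD, List.getElem?_set]
  split_ifs <;> simp_all

lemma pvStep_length (xs : List String) (i : Nat) (del : List Bool) (j : Nat) :
    (pvStep xs i del j).length = del.length := by
  unfold pvStep; split_ifs <;> simp

lemma innerN_getD (xs : List String) (i : Nat) :
    ∀ (js : List Nat) (del : List Bool), (∀ j ∈ js, i < j) → (∀ j ∈ js, j < del.length) →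
    ∀ k, ((js.foldl (pvStep xs i) del).getD k false = true ↔
      del.getD k false = true ∨ (del.getD i false = false ∧ k ∈ js ∧ pvSg xs i = pvSg xs k))
  | [], del, _, _, k => by simp
  | j :: js, del, hij, hlen, k => by
    have hj : i < j := hij j (by simp)
    have hjl : j < del.length := hlen j (by simp)
    have hij' : ∀ j' ∈ js, i < j' := fun j' hm => hij j' (by simp [hm])
    have hlen' : ∀ j' ∈ js, j' < del.length := fun j' hm => hlen j' (by simp [hm])
    rw [List.foldl_cons]
    by_cases hdi : del.getD i false = true
    · have hstep : pvStep xs i del j = del := by unfold pvStep; rw [if_pos hdi]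
      have hdi' : ¬ del.getD i false = false := by
        intro h; rw [h] at hdi; exact absurd hdi (by decide)
      rw [hstep, innerN_getD xs i js del hij' hlen' k]
      simp only [List.mem_cons]
      tauto
    · by_cases hsg : pvSg xs i = pvSg xs j
      · have hstep : pvStep xs i del j = del.set j true := by
          unfold pvStep; rw [if_neg hdi, if_neg (by simp [hsg])]
        have hdif : del.getD i false = false := by
          cases h : del.getD i false
          · rfl
          · exact absurd h hdi
        rw [hstep]
        have hlen'' : ∀ j' ∈ js, j' < (del.set j true).length := by
          simpa using hlen'
        rw [innerN_getD xs i js (del.set j true) hij' hlen'' k]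
        have hgi : (del.set j true).getD i false = del.getD i false := by
          rw [getD_set_bool, if_neg]; rintro ⟨h, _⟩; omega
        rw [hgi, getD_set_bool]
        by_cases hk : j = k
        · subst hk
          rw [if_pos (⟨rfl, hjl⟩ : j = j ∧ j < del.length)]
          constructor
          · intro _; exact Or.inr ⟨hdif, List.mem_cons_self, hsg⟩
          · intro _; exact Or.inl rfl
        · rw [if_neg (by rintro ⟨h, _⟩; exact hk h)]
          simp only [List.mem_cons]
          constructor
          · rintro (h | ⟨h1, h2, h3⟩)
            · exact Or.inl h
            · exact Or.inr ⟨h1, Or.inr h2, h3⟩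
          · rintro (h | ⟨h1, h2 | h2, h3⟩)
            · exact Or.inl h
            · exact absurd h2.symm hk
            · exact Or.inr ⟨h1, h2, h3⟩
      · have hstep : pvStep xs i del j = del := by
          unfold pvStep; rw [if_neg hdi, if_pos hsg]
        rw [hstep, innerN_getD xs i js del hij' hlen' k]
        simp only [List.mem_cons]
        constructor
        · rintro (h | ⟨h1, h2, h3⟩)
          · exact Or.inl h
          · exact Or.inr ⟨h1, Or.inr h2, h3⟩
        · rintro (h | ⟨h1, h2 | h2, h3⟩)
          · exact Or.inl h
          · subst h2; exact absurd h3 hsg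
          · exact Or.inr ⟨h1, h2, h3⟩

lemma innerN_length (xs : List String) (i : Nat) (js : List Nat) (del : List Bool) :
    (js.foldl (pvStep xs i) del).length = del.length := by
  induction js generalizing del with
  | nil => rfl
  | cons j js ih => rw [List.foldl_cons, ih, pvStep_length]

-- the Nat-indexed outer loop
def pvOuter (xs : List String) (del : List Bool) (is : List Nat) : List Bool :=
  is.foldl (fun del i =>
    ((List.range (xs.length - (i + 1))).map (fun k => i + 1 + k)).foldl (pvStep xs i) del) del

lemma pvOuter_length (xs : List String) (is : List Nat) (del : List Bool) :
    (pvOuter xs del is).length = del.length := by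
  induction is generalizing del with
  | nil => rfl
  | cons i is ih => unfold pvOuter at *; rw [List.foldl_cons, ih, innerN_length]

lemma pvOuter_snoc (xs : List String) (del : List Bool) (is : List Nat) (i : Nat) :
    pvOuter xs del (is ++ [i])
      = ((List.range (xs.length - (i + 1))).map (fun k => i + 1 + k)).foldl (pvStep xs i)
          (pvOuter xs del is) := by
  unfold pvOuter
  rw [List.foldl_append, List.foldl_cons, List.foldl_nil]

lemma outer_spec (xs : List String) (m : Nat) (hm : m ≤ xs.length) :
    ∀ k < xs.length,
      ((pvOuter xs (List.replicate xs.length false) (List.range m)).getD k false = true ↔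
        ∃ i, i < m ∧ i < k ∧ pvSg xs i = pvSg xs k) := by
  induction m with
  | zero =>
      intro k hk
      simp [pvOuter]
  | succ m ih =>
      intro k hk
      have hm' : m < xs.length := by omega
      have ihm := ih (by omega)
      set delm := pvOuter xs (List.replicate xs.length false) (List.range m) with hdelm
      have hlenm : delm.length = xs.length := by
        rw [hdelm, pvOuter_length, List.length_replicate]
      rw [List.range_succ, pvOuter_snoc, ← hdelm]
      rw [innerN_getD xs m _ delm
        (by intro j hj; rcases List.mem_map.mp hj with ⟨k', _, rfl⟩; omega)
        (by intro j hj; rcases List.mem_map.mp hj with ⟨k', hk', rfl⟩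
            rw [hlenm]; have := List.mem_range.mp hk'; omega) k]
      have hmem : (k ∈ (List.range (xs.length - (m + 1))).map (fun k => m + 1 + k)) ↔
          (m < k ∧ k < xs.length) := by
        constructor
        · intro h; rcases List.mem_map.mp h with ⟨k', hk', rfl⟩
          have := List.mem_range.mp hk'; omega
        · rintro ⟨h1, h2⟩
          exact List.mem_map.mpr ⟨k - (m + 1), List.mem_range.mpr (by omega), by omega⟩
      have hdm : (delm.getD m false = false) ↔ ¬∃ i, i < m ∧ i < m ∧ pvSg xs i = pvSg xs m := by
        rw [← ihm m hm']
        cases delm.getD m false <;> simp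
      rw [show (delm.getD k false = true) ↔ _ from ihm k hk, hmem, hdm]
      constructor
      · rintro (⟨i, h1, h2, h3⟩ | ⟨h1, ⟨h2, h3⟩, h4⟩)
        · exact ⟨i, by omega, h2, h3⟩
        · exact ⟨m, by omega, h2, h4⟩
      · rintro ⟨i, h1, h2, h3⟩
        by_cases him : i < m
        · exact Or.inl ⟨i, him, h2, h3⟩
        · have hem : i = m := by omega
          by_cases hex : ∃ i', i' < m ∧ i' < m ∧ pvSg xs i' = pvSg xs m
          · rcases hex with ⟨i', h1', _, h3'⟩
            exact Or.inl ⟨i', h1', by omega, h3'.trans (hem ▸ h3)⟩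
          · exact Or.inr ⟨hex, ⟨by omega, hk⟩, hem ▸ h3⟩

-- a skip-if accumulator loop is a filter-map
lemma foldl_skip_if {α β : Type} (g : α → Bool) (f : α → β) :
    ∀ (l : List α) (acc : List β),
    l.foldl (fun acc x => if g x then acc else acc ++ [f x]) acc
      = acc ++ (l.filter (fun x => !g x)).map f
  | [], acc => by simp
  | x :: l, acc => by
    rw [List.foldl_cons]
    by_cases hg : g x = true
    · rw [if_pos hg, foldl_skip_if g f l acc]
      simp [hg]
    · rw [if_neg (by simp [hg]), foldl_skip_if g f l (acc ++ [f x])]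
      simp [hg]

-- the filtered index list is the canonical first-representative list
lemma range'_filter_canon (xs : List String) :
    ∀ (ts : List String) (p : Nat) (seen : List (List Char)),
      xs.drop p = ts →
      (∀ c, c ∈ seen ↔ ∃ i < p, pvSg xs i = c) →
      ((List.range' p ts.length).filter
          (fun k => decide (¬∃ i < k, pvSg xs i = pvSg xs k))).map (fun k => xs.getD k "")
        = pvCanon seen ts
  | [], p, seen, _, _ => by simp [pvCanon]
  | s :: rest, p, seen, hdrop, hseen => by
    have hp : p < xs.length := by
      by_contra h
      rw [List.drop_eq_nil_of_le (by omega)] at hdrop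
      exact absurd hdrop (by simp)
    have hgp : xs.getD p "" = s := by
      have h0 : (xs.drop p)[0]? = some s := by rw [hdrop]; rfl
      rw [List.getElem?_drop] at h0
      norm_num at h0
      simp [List.getD, h0]
    have hdrop' : xs.drop (p + 1) = rest := by
      have := congrArg (List.drop 1) hdrop
      simpa [List.drop_drop, Nat.add_comm] using this
    have hsgp : pvSg xs p = pvSortChars s := by rw [pvSg, hgp]
    have hcond : (∃ i < p, pvSg xs i = pvSg xs p) ↔ pvSortChars s ∈ seen := by
      rw [hsgp]
      exact (hseen (pvSortChars s)).symm
    rw [List.length_cons, List.range'_succ, List.filter_cons]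
    by_cases hin : pvSortChars s ∈ seen
    · rw [if_neg (by simpa using hcond.mpr hin)]
      rw [range'_filter_canon xs rest (p + 1) seen hdrop'
        (by intro c
            rw [hseen c]
            constructor
            · rintro ⟨i, h1, h2⟩; exact ⟨i, by omega, h2⟩
            · rintro ⟨i, h1, h2⟩
              by_cases hip : i < p
              · exact ⟨i, hip, h2⟩
              · have hep : i = p := by omega
                have h2' : pvSortChars s = c := hsgp.symm.trans (hep ▸ h2)
                exact h2' ▸ ((hseen _).mp hin))]
      simp [pvCanon, hin]
    · rw [if_pos (by simpa using fun h => hin (hcond.mp h)), List.map_cons, hgp]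
      rw [range'_filter_canon xs rest (p + 1) (pvSortChars s :: seen) hdrop'
        (by intro c
            simp only [List.mem_cons]
            constructor
            · rintro (rfl | hc)
              · exact ⟨p, by omega, hsgp⟩
              · rcases (hseen c).mp hc with ⟨i, h1, h2⟩
                exact ⟨i, by omega, h2⟩
            · rintro ⟨i, h1, h2⟩
              by_cases hip : i < p
              · exact Or.inr ((hseen c).mpr ⟨i, hip, h2⟩)
              · have hep : i = p := by omega
                exact Or.inl (hsgp.symm.trans (hep ▸ h2)).symm)]
      simp [pvCanon, hin]

-- B's dict loop: its values are exactly the canonical list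
lemma dict_fold_values :
    ∀ (ts : List String) (d : PySem.Dict String String) (seen : List (List Char)),
      (∀ s : String, d.contains (String.ofList (pvSortChars s)) = true ↔ pvSortChars s ∈ seen) →
      (ts.foldl (fun (d : PySem.Dict String String) s =>
        let key := String.ofList (pvSortChars s)
        if d.contains key then d else d.insert key s) d).values
        = d.values ++ pvCanon seen ts
  | [], d, seen, _ => by simp [pvCanon]
  | s :: ts, d, seen, h => by
    rw [List.foldl_cons]
    by_cases hc : d.contains (String.ofList (pvSortChars s)) = true
    · have hin : pvSortChars s ∈ seen := (h s).mp hc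
      simp only [if_pos hc]
      rw [dict_fold_values ts d seen h]
      simp [pvCanon, hin]
    · have hin : pvSortChars s ∉ seen := fun hm => hc ((h s).mpr hm)
      have hc' : d.contains (String.ofList (pvSortChars s)) = false := by
        cases hcc : d.contains (String.ofList (pvSortChars s))
        · rfl
        · exact absurd hcc hc
      simp only [if_neg hc]
      rw [dict_fold_values ts (d.insert (String.ofList (pvSortChars s)) s)
        (pvSortChars s :: seen)
        (by intro t
            rw [PySem.Dict.contains_insert]
            simp only [List.mem_cons, Bool.or_eq_true, beq_iff_eq]
            constructor
            · rintro (he | hct)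
              · left
                have := congrArg String.toList he
                simpa using this
              · exact Or.inr ((h t).mp hct)
            · rintro (he | hm)
              · exact Or.inl (congrArg String.ofList he)
              · exact Or.inr ((h t).mpr hm))]
      have hv : (d.insert (String.ofList (pvSortChars s)) s).values = d.values ++ [s] := by
        simp [PySem.Dict.values, PySem.Dict.items_insert, hc']
      rw [hv]
      simp [pvCanon, hin]

-- converting A's Int-indexed inner loop to the Nat-indexed pvStep fold
lemma convA_inner (xs : List String) (del : List Bool) (i : Nat) :
    (PySem.List.pyRange ((i : Int) + 1) (xs.length : Int) 1).foldl (fun del (j : Int) =>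
      if PySem.List.pyGetD del (i : Int) false then del
      else if pvSortChars (PySem.List.pyGetD xs (i : Int) "") ≠ pvSortChars (PySem.List.pyGetD xs j "") then del
      else del.set j.toNat true) del
    = ((List.range (xs.length - (i + 1))).map (fun k => i + 1 + k)).foldl (pvStep xs i) del := by
  rw [PySem.List.pyRange_one]
  have ht : ((xs.length : Int) - ((i : Int) + 1)).toNat = xs.length - (i + 1) := by omega
  rw [ht, List.foldl_map, List.foldl_map]
  congr 1
  funext del' k'
  have hc : ((i : Int) + 1 + (k' : Int)) = ((i + 1 + k' : Nat) : Int) := by push_cast; ring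
  rw [hc]
  simp only [pvStep, pvSg, PySem.List.pyGetD_natCast, Int.toNat_natCast]
  split_ifs <;> rfl

lemma values_empty_str : (PySem.Dict.empty : PySem.Dict String String).values = [] := by
  simp [PySem.Dict.empty, PySem.Dict.values]

theorem pv_main (text : List String) : funWithAnagrams text = funWithAnagrams_alt text := by
  simp only [funWithAnagrams, funWithAnagrams_alt]
  -- A's outer double loop is the Nat-indexed pvOuter
  have houter :
      (PySem.List.pyRange 0 ((text.length : Int) - 1) 1).foldl (fun del (i : Int) =>
        (PySem.List.pyRange (i + 1) (text.length : Int) 1).foldl (fun del (j : Int) =>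
          if PySem.List.pyGetD del i false then del
          else if pvSortChars (PySem.List.pyGetD text i "") ≠ pvSortChars (PySem.List.pyGetD text j "") then del
          else del.set j.toNat true) del) (List.replicate text.length false)
      = pvOuter text (List.replicate text.length false) (List.range (text.length - 1)) := by
    rw [PySem.List.pyRange_one]
    have ht : (((text.length : Int) - 1) - 0).toNat = text.length - 1 := by omega
    rw [ht, List.foldl_map]
    unfold pvOuter
    congr 1
    funext del i
    have hz : ((0 : Int) + (i : Int)) = (i : Int) := by ring
    rw [hz]
    exact convA_inner text del i
  rw [houter]
  -- A's collection loop is a filter-map over List.range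
  have hfinal : ∀ delF : List Bool,
      (PySem.List.pyRange 0 (text.length : Int) 1).foldl (fun acc (k : Int) =>
        if PySem.List.pyGetD delF k false then acc
        else acc ++ [PySem.List.pyGetD text k ""]) ([] : List String)
      = (List.range text.length).foldl (fun acc k =>
          if delF.getD k false then acc else acc ++ [text.getD k ""]) [] := by
    intro delF
    rw [PySem.List.pyRange_one]
    have ht : ((text.length : Int) - 0).toNat = text.length := by omega
    rw [ht, List.foldl_map]
    congr 1
    funext acc k
    have hz : ((0 : Int) + (k : Int)) = (k : Int) := by ring
    rw [hz]
    simp only [PySem.List.pyGetD_natCast]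
  rw [hfinal]
  rw [foldl_skip_if (fun k => (pvOuter text (List.replicate text.length false)
        (List.range (text.length - 1))).getD k false) (fun k => text.getD k "") _ []]
  have hdel := outer_spec text (text.length - 1) (by omega)
  have hfilter : (List.range text.length).filter
        (fun k => !(pvOuter text (List.replicate text.length false)
          (List.range (text.length - 1))).getD k false)
      = (List.range text.length).filter (fun k => decide (¬∃ i < k, pvSg text i = pvSg text k)) := by
    apply List.filter_congr
    intro k hk
    have hk' := List.mem_range.mp hk
    have hiff := hdel k hk'
    have hminiff : (∃ i, i < text.length - 1 ∧ i < k ∧ pvSg text i = pvSg text k)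
        ↔ (∃ i < k, pvSg text i = pvSg text k) := by
      constructor
      · rintro ⟨i, _, h2, h3⟩; exact ⟨i, h2, h3⟩
      · rintro ⟨i, h2, h3⟩; exact ⟨i, by omega, h2, h3⟩
    rw [hminiff] at hiff
    cases hb : (pvOuter text (List.replicate text.length false)
        (List.range (text.length - 1))).getD k false
    · have hne : ¬∃ i < k, pvSg text i = pvSg text k := by
        rw [← hiff, hb]; exact fun h => absurd h (by decide)
      simp [hne]
    · have hex : ∃ i < k, pvSg text i = pvSg text k := hiff.mp hb
      simp [hex]
  rw [hfilter, List.range_eq_range']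
  rw [show (List.range' 0 text.length) = List.range' 0 (text.length) from rfl]
  have hcanon := range'_filter_canon text text 0 [] (by simp) (by intro c; simp)
  rw [List.nil_append, hcanon]
  -- B's side
  rw [dict_fold_values text PySem.Dict.empty [] (by intro t; simp), values_empty_str, List.nil_append]

-- ===== VERDICT (by name: the statement is the Claim_ definition above) =====
theorem funWithAnagrams_spec : Claim_equal_funWithAnagrams := by
  intro text _
  unfold Spec_funWithAnagrams
  exact pv_main text
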